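-- pv_equiv track=rewrite | github.com/krith0/Convolutional-Codes | encoder.py | viterbi_encoder
-- ===== SOURCE A (Python) =====
-- def v_xor(bit0, bit1):
--     if bit0 == bit1:
--         return "0"
--     else:
--         return "1"
--
-- def viterbi_encoder(inputs):
--     s_reg = ["0", "0", "0"]
--     encoded_output = []
--
--     for t in range(0, len(inputs)):
--         s_reg[2] = s_reg[1]
--         s_reg[1] = s_reg[0]
--         s_reg[0] = inputs[t]
--
--         output1 = v_xor(v_xor(s_reg[0], s_reg[1]), s_reg[2])
--         output2 = v_xor(s_reg[0], s_reg[2])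
--
--         encoded_output.append(output1 + output2)
--
--     return encoded_output
-- ===== SOURCE B (Python) =====
-- def v_xor(bit0, bit1):
--     if bit0 == bit1:
--         return "0"
--     else:
--         return "1"
--
-- def viterbi_encoder(inputs):
--     # stateless: align the input with itself delayed by 1 and 2 positions
--     delay1 = ["0"] + list(inputs)
--     delay2 = ["0", "0"] + list(inputs)
--     return [v_xor(v_xor(b0, b1), b2) + v_xor(b0, b2)
--             for b0, b1, b2 in zip(inputs, delay1, delay2)]
-- ===== Notes on version B (the rewrite author's own statement) =====
-- stated objective: simpler
-- what changed: Replaces the mutable 3-cell shift register maintained across the loop with a stateless comprehension over the input zipped with its 1- and 2-step '0'-padded delayed copies.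
import Mathlib
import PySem

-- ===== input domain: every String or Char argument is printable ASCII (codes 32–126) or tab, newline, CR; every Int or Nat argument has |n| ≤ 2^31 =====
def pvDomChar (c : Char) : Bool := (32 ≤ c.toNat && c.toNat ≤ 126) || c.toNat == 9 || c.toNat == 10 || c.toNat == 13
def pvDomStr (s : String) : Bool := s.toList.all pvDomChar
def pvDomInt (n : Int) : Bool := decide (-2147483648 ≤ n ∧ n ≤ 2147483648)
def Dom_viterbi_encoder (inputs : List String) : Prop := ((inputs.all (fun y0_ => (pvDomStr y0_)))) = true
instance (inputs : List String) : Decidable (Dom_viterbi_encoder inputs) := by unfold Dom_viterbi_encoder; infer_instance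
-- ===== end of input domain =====

-- B eliminates A's mutable shift register: it zips the input with its '0'-padded delayed copies (objective: simpler).

-- ===== PORT A =====
def v_xor (bit0 bit1 : String) : String :=
  if bit0 == bit1 then "0" else "1"

-- A's loop: the 3-cell register shifts (s0,s1,s2) → (inputs[t], s0, s1) each step;
-- the recursion carries the register and emits one output per element.
def viterbi_encoder_go (s0 s1 s2 : String) : List String → List String
  | [] => []
  | x :: rest =>
      -- s_reg[2] = s_reg[1]; s_reg[1] = s_reg[0]; s_reg[0] = inputs[t]
      let n2 := s1
      let n1 := s0
      let n0 := x
      (v_xor (v_xor n0 n1) n2 ++ v_xor n0 n2) :: viterbi_encoder_go n0 n1 n2 rest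

def viterbi_encoder (inputs : List String) : List String :=
  viterbi_encoder_go "0" "0" "0" inputs

-- ===== PORT B =====
-- zip of the input with its delayed copies (truncates to the shortest, i.e. inputs)
def viterbi_zip3 : List String → List String → List String → List String
  | b0 :: xs, b1 :: ys, b2 :: zs =>
      (v_xor (v_xor b0 b1) b2 ++ v_xor b0 b2) :: viterbi_zip3 xs ys zs
  | _, _, _ => []

def viterbi_encoder_alt (inputs : List String) : List String :=
  let delay1 := "0" :: inputs
  let delay2 := "0" :: "0" :: inputs
  viterbi_zip3 inputs delay1 delay2

-- ===== PRECONDITION & SPEC =====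
def Spec_viterbi_encoder (inputs : List String) (out : List String) : Prop := out = viterbi_encoder_alt inputs
instance (inputs : List String) (out : List String) : Decidable (Spec_viterbi_encoder inputs out) := by unfold Spec_viterbi_encoder; infer_instance

-- ===== CLAIM (what is proved, stated in full; the proofs are below) =====
def Claim_equal_viterbi_encoder : Prop := ∀ (inputs : List String), Dom_viterbi_encoder inputs → Spec_viterbi_encoder inputs (viterbi_encoder inputs)

-- ===== LEMMAS AND PROOFS =====
-- Invariant: the register (s0,s1) carried by A's loop is exactly the pair of delayed
-- streams B zips with (s2 is dead: it is overwritten before being read).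
theorem viterbi_go_eq_zip3 (inputs : List String) : ∀ (s0 s1 s2 : String),
    viterbi_encoder_go s0 s1 s2 inputs = viterbi_zip3 inputs (s0 :: inputs) (s1 :: s0 :: inputs) := by
  induction inputs with
  | nil => intro s0 s1 s2; rfl
  | cons x rest ih =>
      intro s0 s1 s2
      simp [viterbi_encoder_go, viterbi_zip3, ih]

-- ===== VERDICT (by name: the statement is the Claim_ definition above) =====
theorem viterbi_encoder_spec : Claim_equal_viterbi_encoder := by
  intro inputs _
  show viterbi_encoder inputs = viterbi_encoder_alt inputs
  simp [viterbi_encoder, viterbi_encoder_alt, viterbi_go_eq_zip3]
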